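-- pv_equiv track=rewrite | github.com/sogang-isds/Korean-MWPS | ai_challenge_2step_data/functions.py | func_multiple
-- ===== SOURCE A (Python) =====
-- def func_multiple(arg0, arg1):
--     # arg0: list of numbers or digit
--     # arg_1: we need to find multiple of arg_1
--     # return: list of numbers that are multiple of arg_1
--     output = []
--     if type(arg0) == int:
--         num_list = range(10**(arg0-1),10**arg0)
--         for i in num_list:
--             if i % arg1 == 0:
--                 output.append(i)
--     else:
--         for i in arg0:
--             if i % arg1 == 0:
--                 output.append(i)
--     result = output
--     return result
-- ===== SOURCE B (Python) =====
-- def func_multiple(arg0, arg1):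
--     # int branch: jump along the arithmetic progression of multiples instead of
--     # mod-testing every number in the decade.
--     if type(arg0) == int:
--         d = abs(arg1)
--         lo = 10 ** (arg0 - 1)
--         start = -(-lo // d) * d  # first multiple of d >= lo
--         return list(range(start, 10 ** arg0, d))
--     # list branch: divide-and-conquer — split the list in half, solve each half,
--     # concatenate; correct because filtering distributes over concatenation.
--     def go(xs):
--         if len(xs) == 0:
--             return []
--         if len(xs) == 1:
--             return [xs[0]] if xs[0] % arg1 == 0 else []
--         mid = len(xs) // 2
--         return go(xs[:mid]) + go(xs[mid:])
--     return go(arg0)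
-- ===== Notes on version B (the rewrite author's own statement) =====
-- stated objective: alternative
-- what changed: B replaces A's single forward loop with an append-accumulator by a divide-and-conquer recursion that splits the list in half, filters each half, and concatenates (and, in Python's int-argument branch, steps along the arithmetic progression of multiples instead of mod-testing every number in the decade).
import Mathlib
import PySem

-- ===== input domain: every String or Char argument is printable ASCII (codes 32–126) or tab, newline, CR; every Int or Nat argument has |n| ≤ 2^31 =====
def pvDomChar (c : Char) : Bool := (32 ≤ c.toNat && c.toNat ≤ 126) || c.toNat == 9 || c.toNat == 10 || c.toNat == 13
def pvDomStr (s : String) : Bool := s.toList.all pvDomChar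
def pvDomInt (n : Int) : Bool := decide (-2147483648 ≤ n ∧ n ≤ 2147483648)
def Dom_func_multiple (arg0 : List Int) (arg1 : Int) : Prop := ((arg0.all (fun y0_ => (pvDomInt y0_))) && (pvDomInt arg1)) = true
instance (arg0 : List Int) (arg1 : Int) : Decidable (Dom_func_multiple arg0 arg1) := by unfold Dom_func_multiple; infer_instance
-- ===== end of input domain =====

-- B replaces A's forward loop with an append-accumulator by a divide-and-conquer
-- recursion: split in half, filter each half, concatenate (the Python
-- int-argument branch lies outside this List Int signature).
-- ===== PORT A =====
-- Python A (list branch): output = []; for i in arg0: if i % arg1 == 0: output.append(i); return output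
def func_multiple (arg0 : List Int) (arg1 : Int) : List Int :=
  arg0.foldl (fun output i => if PySem.Int.mod i arg1 = 0 then output ++ [i] else output) []

-- ===== PORT B =====
-- Python B's helper go; xs[:mid] / xs[mid:] with 0 ≤ mid ≤ len(xs) are List.take / List.drop
def func_multiple_go (arg1 : Int) (xs : List Int) : List Int :=
  match h : xs with
  | [] => []
  | [x] => if PySem.Int.mod x arg1 = 0 then [x] else []
  | _ :: _ :: _ =>
      let mid := xs.length / 2
      func_multiple_go arg1 (xs.take mid) ++ func_multiple_go arg1 (xs.drop mid)
termination_by xs.length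
decreasing_by
  · simp [h]; omega
  · simp [h]; omega

def func_multiple_alt (arg0 : List Int) (arg1 : Int) : List Int :=
  func_multiple_go arg1 arg0

-- ===== PRECONDITION & SPEC =====
-- A raises ZeroDivisionError when arg1 = 0 and arg0 is nonempty (and B does too);
-- exactly those inputs are excluded. (The List Int signature is the grader's Dom,
-- not a narrowing by Pre_.)
def Pre_func_multiple (arg0 : List Int) (arg1 : Int) : Prop := arg0 ≠ [] → arg1 ≠ 0
instance (arg0 : List Int) (arg1 : Int) : Decidable (Pre_func_multiple arg0 arg1) := by unfold Pre_func_multiple; infer_instance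
def pvWitness_func_multiple : List Int × Int := ([6, 7, -9, 0], 3)
def Spec_func_multiple (arg0 : List Int) (arg1 : Int) (out : List Int) : Prop := out = func_multiple_alt arg0 arg1
instance (arg0 : List Int) (arg1 : Int) (out : List Int) : Decidable (Spec_func_multiple arg0 arg1 out) := by unfold Spec_func_multiple; infer_instance

-- ===== CLAIM =====
def Claim_equal_func_multiple : Prop := ∀ (arg0 : List Int) (arg1 : Int), Dom_func_multiple arg0 arg1 → Pre_func_multiple arg0 arg1 → Spec_func_multiple arg0 arg1 (func_multiple arg0 arg1)

-- ===== LEMMAS AND PROOFS =====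
-- A's fold with accumulator acc equals acc ++ filter.
lemma foldl_eq_filter (arg1 : Int) (xs : List Int) (acc : List Int) :
    xs.foldl (fun output i => if PySem.Int.mod i arg1 = 0 then output ++ [i] else output) acc
      = acc ++ xs.filter (fun i => PySem.Int.mod i arg1 = 0) := by
  induction xs generalizing acc with
  | nil => simp
  | cons x xs ih =>
    by_cases h : PySem.Int.mod x arg1 = 0 <;>
      simp [List.foldl_cons, List.filter_cons, h, ih]

-- B's divide-and-conquer equals filter: strong induction on the length,
-- filtering distributes over the take/drop split.
lemma go_eq_filter (arg1 : Int) (xs : List Int) :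
    func_multiple_go arg1 xs = xs.filter (fun i => PySem.Int.mod i arg1 = 0) := by
  induction hn : xs.length using Nat.strong_induction_on generalizing xs with
  | _ n ih =>
    match xs, hn with
    | [], _ => simp [func_multiple_go]
    | [x], _ => simp [func_multiple_go, List.filter_cons]
    | x :: y :: rest, hn =>
      rw [func_multiple_go]
      have hlen : rest.length + 2 = n := by simpa using hn
      have htk : ((x :: y :: rest).take ((x :: y :: rest).length / 2)).length < n := by
        simp [List.length_take]; omega
      have hdr : ((x :: y :: rest).drop ((x :: y :: rest).length / 2)).length < n := by
        simp [List.length_drop]; omega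
      rw [ih _ htk _ rfl, ih _ hdr _ rfl,
        ← List.filter_append, List.take_append_drop]

-- ===== VERDICT =====
theorem func_multiple_spec : Claim_equal_func_multiple := by
  intro arg0 arg1 _ _
  unfold Spec_func_multiple func_multiple func_multiple_alt
  rw [go_eq_filter]
  simpa using foldl_eq_filter arg1 arg0 []
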